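-- pv_equiv track=rewrite | github.com/RamananVr/Leetcodepython | greedy_algorithm/2268_unknown_title.py | minimumKeypresses
-- ===== SOURCE A (Python) =====
-- from collections import Counter
--
-- def minimumKeypresses(s: str) -> int:
--     # Count the frequency of each character in the string
--     freq = Counter(s)
--
--     # Sort characters by frequency in descending order
--     # If two characters have the same frequency, their order doesn't matter
--     sorted_freq = sorted(freq.values(), reverse=True)
--
--     # Assign characters to keys and calculate the total keypresses
--     total_keypresses = 0
--     for i, count in enumerate(sorted_freq):
--         # Determine the keypress cost based on the position in the sorted list
--         keypress_cost = (i // 9) + 1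
--         total_keypresses += keypress_cost * count
--
--     return total_keypresses
-- ===== SOURCE B (Python) =====
-- from collections import Counter
--
-- def minimumKeypresses(s: str) -> int:
--     # Same frequency count and descending sort; then a suffix-sum decomposition:
--     # each block of 9 positions adds the sum of the remaining suffix once more,
--     # so position j is counted (j // 9) + 1 times in total.
--     sorted_freq = sorted(Counter(s).values(), reverse=True)
--
--     def chunks(lst):
--         if not lst:
--             return 0
--         return sum(lst) + chunks(lst[9:])
--
--     return chunks(sorted_freq)
-- ===== Notes on version B (the rewrite author's own statement) =====
-- stated objective: alternative
-- what changed: A's per-index weighted loop over enumerate (multiplier i//9+1 per position) is replaced by a suffix-sum decomposition: recursively add the sum of the remaining sorted suffix once per block of 9, eliminating index arithmetic and enumerate.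
import Mathlib
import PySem

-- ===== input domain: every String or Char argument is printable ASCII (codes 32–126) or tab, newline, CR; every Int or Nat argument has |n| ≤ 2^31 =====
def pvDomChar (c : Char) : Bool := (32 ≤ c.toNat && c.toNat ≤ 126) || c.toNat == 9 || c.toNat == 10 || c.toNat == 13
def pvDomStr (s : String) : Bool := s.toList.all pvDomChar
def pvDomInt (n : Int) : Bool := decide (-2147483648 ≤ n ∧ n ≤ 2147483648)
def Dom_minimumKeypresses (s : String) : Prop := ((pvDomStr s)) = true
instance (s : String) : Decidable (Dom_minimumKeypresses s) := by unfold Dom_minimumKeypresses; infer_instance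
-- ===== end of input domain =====

-- B replaces A's per-index weighted loop by a suffix-sum decomposition over blocks of 9 (alternative, same cost).

-- ===== PORT A =====
def minimumKeypresses (s : String) : Int :=
  let freq := PySem.Dict.counter s.toList
  let sortedFreq := PySem.List.sorted freq.values (fun x => x) true
  (PySem.List.enumerate sortedFreq 0).foldl
    (fun total ic => total + (PySem.Int.floordiv ic.1 9 + 1) * ic.2) 0

-- ===== PORT B =====
-- lst[9:] on the list (c :: t) is (c :: t).drop 9 = t.drop 8 (PySem.List.slice_from_natCast)
def pvChunks : List Int → Int
  | [] => 0
  | c :: t => (c :: t).sum + pvChunks (t.drop 8)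
termination_by l => l.length
decreasing_by simp

def minimumKeypresses_alt (s : String) : Int :=
  let sortedFreq := PySem.List.sorted (PySem.Dict.counter s.toList).values (fun x => x) true
  pvChunks sortedFreq

-- ===== PRECONDITION & SPEC =====
def Spec_minimumKeypresses (s : String) (out : Int) : Prop := out = minimumKeypresses_alt s
instance (s : String) (out : Int) : Decidable (Spec_minimumKeypresses s out) := by unfold Spec_minimumKeypresses; infer_instance

-- ===== CLAIM (what is proved, stated in full; the proofs are below) =====
def Claim_equal_minimumKeypresses : Prop := ∀ (s : String), Dom_minimumKeypresses s → Spec_minimumKeypresses s (minimumKeypresses s)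

-- ===== LEMMAS AND PROOFS =====

-- A's loop body, unrolled: T j l = Σ ((j+idx)//9 + 1) * elem over l
def pvT (j : Int) : List Int → Int
  | [] => 0
  | c :: t => (PySem.Int.floordiv j 9 + 1) * c + pvT (j + 1) t

theorem pvFoldl_eq_T (l : List Int) : ∀ (j acc : Int),
    (PySem.List.enumerate l j).foldl
      (fun total ic => total + (PySem.Int.floordiv ic.1 9 + 1) * ic.2) acc
      = acc + pvT j l := by
  induction l with
  | nil => intro j acc; simp [PySem.List.enumerate_nil, pvT]
  | cons c t ih =>
      intro j acc
      rw [PySem.List.enumerate_cons]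
      simp only [List.foldl_cons, ih, pvT]
      ring

theorem pvT_append (a : List Int) : ∀ (b : List Int) (j : Int),
    pvT j (a ++ b) = pvT j a + pvT (j + a.length) b := by
  induction a with
  | nil => intro b j; simp [pvT]
  | cons c t ih =>
      intro b j
      simp only [List.cons_append, pvT, List.length_cons]
      rw [ih b (j + 1)]
      push_cast
      rw [show j + ((t.length : Int) + 1) = j + 1 + t.length from by ring]
      ring

theorem pvFloordiv_nonneg_lt (j : Int) (h0 : 0 ≤ j) (h9 : j < 9) :
    PySem.Int.floordiv j 9 = 0 := by
  rw [PySem.Int.floordiv_eq_ediv_of_pos (by omega)]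
  omega

theorem pvT_small (l : List Int) : ∀ (j : Int), 0 ≤ j → j + l.length ≤ 9 →
    pvT j l = l.sum := by
  induction l with
  | nil => intro j _ _; simp [pvT]
  | cons c t ih =>
      intro j h0 h9
      simp only [List.length_cons] at h9
      have hlt : j < 9 := by
        have : (0:Int) ≤ (t.length : Int) := by exact_mod_cast Nat.zero_le _
        omega
      simp only [pvT, pvFloordiv_nonneg_lt j h0 hlt, List.sum_cons]
      rw [ih (j + 1) (by omega) (by push_cast at h9 ⊢; omega)]
      ring

theorem pvT_add9 (l : List Int) : ∀ (j : Int), 0 ≤ j →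
    pvT (j + 9) l = l.sum + pvT j l := by
  induction l with
  | nil => intro j _; simp [pvT]
  | cons c t ih =>
      intro j h0
      have hdiv : PySem.Int.floordiv (j + 9) 9 = PySem.Int.floordiv j 9 + 1 := by
        rw [PySem.Int.floordiv_eq_ediv_of_pos (by omega),
            PySem.Int.floordiv_eq_ediv_of_pos (by omega)]
        omega
      simp only [pvT, hdiv, List.sum_cons]
      rw [show j + 9 + 1 = (j + 1) + 9 by ring, ih (j + 1) (by omega)]
      ring

theorem pvChunks_nil : pvChunks [] = 0 := pvChunks.eq_1

theorem pvChunks_cons (c : Int) (t : List Int) :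
    pvChunks (c :: t) = (c :: t).sum + pvChunks (t.drop 8) := by
  rw [pvChunks.eq_2]

theorem pvT_eq_chunks : ∀ (n : ℕ) (l : List Int), l.length ≤ n →
    pvT 0 l = pvChunks l := by
  intro n
  induction n with
  | zero =>
      intro l hl
      have : l = [] := List.eq_nil_of_length_eq_zero (by omega)
      subst this; simp [pvT, pvChunks_nil]
  | succ n ih =>
      intro l hl
      cases l with
      | nil => simp [pvT, pvChunks_nil]
      | cons c t =>
          have hsplit : (c :: t) = (c :: t).take 9 ++ (c :: t).drop 9 :=
            (List.take_append_drop 9 (c :: t)).symm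
          have hdrop8 : t.drop 8 = (c :: t).drop 9 := rfl
          have hsum : (c :: t).sum = ((c :: t).take 9).sum + ((c :: t).drop 9).sum := by
            conv_lhs => rw [hsplit]
            rw [List.sum_append]
          by_cases hlen : (c :: t).length ≤ 9
          · have hdropnil : (c :: t).drop 9 = [] := List.drop_eq_nil_of_le hlen
            rw [pvChunks_cons, hdrop8, hdropnil, pvChunks_nil]
            rw [pvT_small (c :: t) 0 le_rfl (by simp only [List.length_cons] at hlen ⊢; push_cast; omega)]
            ring
          · rw [Nat.not_le] at hlen
            have htake9 : ((c :: t).take 9).length = 9 := by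
              simp only [List.length_take, List.length_cons] at hlen ⊢; omega
            have hih : pvT 0 ((c :: t).drop 9) = pvChunks ((c :: t).drop 9) := by
              apply ih
              simp only [List.length_drop, List.length_cons] at hl hlen ⊢
              omega
            calc pvT 0 (c :: t)
                = pvT 0 ((c :: t).take 9 ++ (c :: t).drop 9) := by rw [← hsplit]
              _ = pvT 0 ((c :: t).take 9) + pvT (0 + (((c :: t).take 9).length : Int)) ((c :: t).drop 9) :=
                  pvT_append _ _ _
              _ = ((c :: t).take 9).sum + (((c :: t).drop 9).sum + pvT 0 ((c :: t).drop 9)) := by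
                  rw [pvT_small ((c :: t).take 9) 0 le_rfl (by rw [htake9]; norm_num),
                      htake9]
                  norm_num
                  exact pvT_add9 _ 0 le_rfl
              _ = (c :: t).sum + pvChunks ((c :: t).drop 9) := by
                  rw [hih, hsum]; ring
              _ = pvChunks (c :: t) := by rw [pvChunks_cons, hdrop8]

-- ===== VERDICT (by name: the statement is the Claim_ definition above) =====
theorem minimumKeypresses_spec : Claim_equal_minimumKeypresses := by
  intro s _
  unfold Spec_minimumKeypresses minimumKeypresses minimumKeypresses_alt
  simp only []
  rw [pvFoldl_eq_T, zero_add]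
  exact pvT_eq_chunks _ _ le_rfl
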